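-- pv_equiv track=rewrite | github.com/TasbasMN/Thesis | scripts/utils_v2_for_jupyter.py | align_sequences
-- ===== SOURCE A (Python) =====
-- def align_sequences(seq1, seq2, allow_wobbles=False):
--     """
--     Aligns two sequences of the same size and creates a string of 1's and 0's representing nucleotide matches.
--     If allow_wobbles is True, it will also check for G:U wobbles and appends 2.
--
--     Args:
--         seq1 (str): sequence 1
--         seq2 (str): sequence 2
--         allow_wobbles (bool, optional): if allowed, check for G:U wobbles. Defaults to False.
--
--     Returns:
--         Tuple: alignment_string containing the alignment string, pair_count containing the number of nucleotide matches,
--         and wobble_count containing the number of G:U wobbles (if True)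
--     """
--
--     alignment_string = []
--     pair_count = 0
--     wobble_count = 0
--
--     for nucleotide_1, nucleotide_2 in zip(seq1, seq2):
--         if nucleotide_1 == nucleotide_2:
--             alignment_string.append("1")
--             pair_count += 1
--         elif allow_wobbles and ((nucleotide_1 == "G" and nucleotide_2 == "U") or (nucleotide_1 == "U" and nucleotide_2 == "G")):
--             alignment_string.append("2")
--             wobble_count += 1
--         else:
--             alignment_string.append("0")
--
--     return "".join(alignment_string), pair_count, wobble_count
-- ===== SOURCE B (Python) =====
-- WOBBLE_PAIRS = (("G", "U"), ("U", "G"))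
--
--
-- def align_sequences(seq1, seq2, allow_wobbles=False):
--     # Index-set algorithm: compute the sets of match positions and wobble
--     # positions first, then patch a "0"-filled buffer by positional
--     # assignment; the counts are just the sizes of the index lists.
--     n = min(len(seq1), len(seq2))
--     match_idx = [i for i in range(n) if seq1[i] == seq2[i]]
--     wobble_idx = [i for i in range(n)
--                   if allow_wobbles and (seq1[i], seq2[i]) in WOBBLE_PAIRS]
--     chars = ["0"] * n
--     for i in match_idx:
--         chars[i] = "1"
--     for i in wobble_idx:
--         chars[i] = "2"
--     return "".join(chars), len(match_idx), len(wobble_idx)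
-- ===== Notes on version B (the rewrite author's own statement) =====
-- stated objective: alternative
-- what changed: B computes the lists of match indices and wobble indices first, builds the alignment string by patching a '0'-filled buffer at those positions, and returns the index-list lengths as the counts, instead of A's single fused left-to-right loop that classifies each pair and tallies counters as it appends.
import Mathlib
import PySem

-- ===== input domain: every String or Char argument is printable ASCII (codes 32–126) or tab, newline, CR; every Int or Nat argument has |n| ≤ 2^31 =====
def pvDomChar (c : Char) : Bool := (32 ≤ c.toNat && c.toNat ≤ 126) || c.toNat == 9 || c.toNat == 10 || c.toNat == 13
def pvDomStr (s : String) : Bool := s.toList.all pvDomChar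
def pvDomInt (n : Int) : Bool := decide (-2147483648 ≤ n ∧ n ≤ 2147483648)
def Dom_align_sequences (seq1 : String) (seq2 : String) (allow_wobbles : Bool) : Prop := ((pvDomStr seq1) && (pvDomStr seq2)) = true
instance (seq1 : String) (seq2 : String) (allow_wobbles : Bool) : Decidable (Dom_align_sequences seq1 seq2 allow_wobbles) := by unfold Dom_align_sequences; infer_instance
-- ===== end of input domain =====

-- B replaces A's fused classify-and-tally loop by an index-set algorithm: it computes the match and wobble index lists first, builds the string by patching a '0'-filled buffer at those positions, and returns the index-list lengths as the counts (objective: alternative, same cost).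


-- ===== PORT A =====
-- Transliteration of A: one fused loop over zip(seq1,seq2) appending to the
-- alignment list and incrementing the counters as it goes.
def pvStepA (allow_wobbles : Bool) (st : List Char × Int × Int) (p : Char × Char) :
    List Char × Int × Int :=
  let (alignment_string, pair_count, wobble_count) := st
  let (nucleotide_1, nucleotide_2) := p
  if nucleotide_1 = nucleotide_2 then
    (alignment_string ++ ['1'], pair_count + 1, wobble_count)
  else if allow_wobbles && ((nucleotide_1 = 'G' && nucleotide_2 = 'U') || (nucleotide_1 = 'U' && nucleotide_2 = 'G')) then
    (alignment_string ++ ['2'], pair_count, wobble_count + 1)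
  else
    (alignment_string ++ ['0'], pair_count, wobble_count)

def align_sequences (seq1 : String) (seq2 : String) (allow_wobbles : Bool) : String × Int × Int :=
  let st := (seq1.toList.zip seq2.toList).foldl (pvStepA allow_wobbles) ([], 0, 0)
  (String.mk st.1, st.2.1, st.2.2)

-- ===== PORT B =====
-- Transliteration of B (Source B). `range(n)` for the nonnegative n = min of the
-- lengths is ported as List.range n, and `seq[i]` for 0 ≤ i < len as `l[i]!`;
-- both are exact on that domain.
def pvWobblePairs : List (Char × Char) := [('G', 'U'), ('U', 'G')]

def align_sequences_alt (seq1 : String) (seq2 : String) (allow_wobbles : Bool) : String × Int × Int :=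
  let l1 := seq1.toList
  let l2 := seq2.toList
  let n := min l1.length l2.length
  let match_idx := (List.range n).filter (fun i => l1[i]! = l2[i]!)
  let wobble_idx := (List.range n).filter (fun i => allow_wobbles && decide ((l1[i]!, l2[i]!) ∈ pvWobblePairs))
  let chars0 := match_idx.foldl (fun o i => o.set i '1') (List.replicate n '0')
  let chars := wobble_idx.foldl (fun o i => o.set i '2') chars0
  (String.mk chars, (match_idx.length : Int), (wobble_idx.length : Int))

-- ===== PRECONDITION & SPEC =====
def Spec_align_sequences (seq1 : String) (seq2 : String) (allow_wobbles : Bool) (out : String × Int × Int) : Prop := out = align_sequences_alt seq1 seq2 allow_wobbles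
instance (seq1 : String) (seq2 : String) (allow_wobbles : Bool) (out : String × Int × Int) : Decidable (Spec_align_sequences seq1 seq2 allow_wobbles out) := by unfold Spec_align_sequences; infer_instance

-- ===== CLAIM =====
def Claim_equal_align_sequences : Prop := ∀ (seq1 : String) (seq2 : String) (allow_wobbles : Bool), Dom_align_sequences seq1 seq2 allow_wobbles → Spec_align_sequences seq1 seq2 allow_wobbles (align_sequences seq1 seq2 allow_wobbles)

-- ===== LEMMAS AND PROOFS =====

-- the per-pair classification implicit in A's branch structure
def pvClassify (aw : Bool) (p : Char × Char) : Char :=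
  if p.1 = p.2 then '1'
  else if aw && ((p.1 = 'G' && p.2 = 'U') || (p.1 = 'U' && p.2 = 'G')) then '2'
  else '0'

-- A's fused loop, characterised
theorem foldl_state (aw : Bool) (l : List (Char × Char)) (acc : List Char) (p w : Int) :
    l.foldl (pvStepA aw) (acc, p, w)
    = (acc ++ l.map (pvClassify aw),
       p + ((l.map (pvClassify aw)).count '1' : Int),
       w + ((l.map (pvClassify aw)).count '2' : Int)) := by
  induction l generalizing acc p w with
  | nil => simp
  | cons q t ih =>
    obtain ⟨a, b⟩ := q
    simp only [List.foldl_cons, List.map_cons]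
    by_cases h1 : a = b
    · rw [show pvStepA aw (acc, p, w) (a, b) = (acc ++ ['1'], p + 1, w) from by
        simp [pvStepA, h1], ih, show pvClassify aw (a, b) = '1' from by simp [pvClassify, h1]]
      simp
      ring
    · by_cases h2 : (aw && ((a = 'G' && b = 'U') || (a = 'U' && b = 'G'))) = true
      · rw [show pvStepA aw (acc, p, w) (a, b) = (acc ++ ['2'], p, w + 1) from by
          simp [pvStepA, h1, h2], ih, show pvClassify aw (a, b) = '2' from by simp [pvClassify, h1, h2]]
        simp
        ring
      · rw [show pvStepA aw (acc, p, w) (a, b) = (acc ++ ['0'], p, w) from by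
          simp [pvStepA, h1, h2], ih, show pvClassify aw (a, b) = '0' from by simp [pvClassify, h1, h2]]
        simp

theorem mem_wobblePairs (p : Char × Char) :
    p ∈ pvWobblePairs ↔ (p.1 = 'G' ∧ p.2 = 'U') ∨ (p.1 = 'U' ∧ p.2 = 'G') := by
  rcases p with ⟨a, b⟩
  simp [pvWobblePairs, Prod.ext_iff]

theorem ne_of_mem_wobble (p : Char × Char) (h : p ∈ pvWobblePairs) : p.1 ≠ p.2 := by
  rw [mem_wobblePairs] at h
  rcases h with ⟨hG, hU⟩ | ⟨hU, hG⟩ <;> rw [hG, hU] <;> decide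

theorem cond_eq (aw : Bool) (a b : Char) :
    (aw && ((a = 'G' && b = 'U') || (a = 'U' && b = 'G')))
      = (aw && decide ((a, b) ∈ pvWobblePairs)) := by
  rw [Bool.eq_iff_iff]
  simp [mem_wobblePairs]

theorem classify_eq_one (aw : Bool) (p : Char × Char) :
    (pvClassify aw p = '1') ↔ p.1 = p.2 := by
  unfold pvClassify
  split_ifs <;> simp_all

theorem classify_eq_two (aw : Bool) (p : Char × Char) :
    (pvClassify aw p = '2') ↔ (aw && decide (p ∈ pvWobblePairs)) = true := by
  rcases p with ⟨a, b⟩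
  unfold pvClassify
  simp only [cond_eq aw a b]
  split_ifs with h1 h2
  · constructor
    · intro h; exact absurd h (by decide)
    · intro h
      rw [Bool.and_eq_true, decide_eq_true_iff] at h
      exact absurd h1 (ne_of_mem_wobble _ h.2)
  · simp [h2]
  · constructor
    · intro h; exact absurd h (by decide)
    · intro h; exact absurd h h2

-- zip as indexing over the common range
theorem zip_eq_range_map (l1 l2 : List Char) :
    l1.zip l2 = (List.range (min l1.length l2.length)).map (fun i => (l1[i]!, l2[i]!)) := by
  induction l1 generalizing l2 with
  | nil => simp
  | cons a t ih =>
    cases l2 with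
    | nil => simp
    | cons b u =>
      simp only [List.zip_cons_cons, List.length_cons, Nat.succ_min_succ,
        List.range_succ_eq_map, List.map_cons, List.map_map]
      rw [ih u]
      simp [Function.comp_def]

-- positional patching, elementwise
theorem foldl_set_get (c : Char) (idxs : List Nat) (out : List Char) (j : Nat)
    (hj : j < out.length) :
    (idxs.foldl (fun o i => o.set i c) out)[j]! = if j ∈ idxs then c else out[j]! := by
  induction idxs generalizing out with
  | nil => simp
  | cons i t ih =>
    simp only [List.foldl_cons]
    rw [ih (out.set i c) (by simpa using hj)]
    by_cases hm : j ∈ t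
    · simp [hm]
    · by_cases hij : j = i
      · subst hij
        simp [hm, hj]
      · have : (out.set i c)[j]! = out[j]! := by
          rw [List.getElem!_eq_getElem?_getD, List.getElem!_eq_getElem?_getD,
            List.getElem?_set_ne (by omega)]
        simp [hm, hij, this]

theorem foldl_set_length (c : Char) (idxs : List Nat) (out : List Char) :
    (idxs.foldl (fun o i => o.set i c) out).length = out.length := by
  induction idxs generalizing out with
  | nil => rfl
  | cons i t ih => simp [List.foldl_cons, ih]

-- ===== VERDICT =====
theorem align_sequences_spec : Claim_equal_align_sequences := by
  intro seq1 seq2 aw _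
  unfold Spec_align_sequences align_sequences align_sequences_alt
  set l1 := seq1.toList
  set l2 := seq2.toList
  set n := min l1.length l2.length with hn
  rw [foldl_state]
  simp only [List.nil_append, zero_add]
  rw [zip_eq_range_map, ← hn, List.map_map]
  refine Prod.ext ?_ (Prod.ext ?_ ?_)
  · -- alignment strings
    dsimp only
    congr 1
    apply List.ext_getElem
    · simp [foldl_set_length]
    · intro j h1 h2
      have hjn : j < n := by
        simpa [foldl_set_length] using h2
      conv_rhs => rw [← getElem!_pos _ j h2]
      rw [foldl_set_get _ _ _ j (by simpa [foldl_set_length] using h2),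
        foldl_set_get _ _ _ j (by simpa using hjn)]
      have hj0 : (List.replicate n '0')[j]! = '0' := by
        simp [hjn]
      rw [hj0]
      simp only [List.getElem_map, List.getElem_range, Function.comp_apply,
        List.mem_filter, List.mem_range]
      by_cases he : l1[j]! = l2[j]!
      · have hnw : ¬ ((aw && decide ((l1[j]!, l2[j]!) ∈ pvWobblePairs)) = true) := by
          rw [Bool.and_eq_true, decide_eq_true_iff]
          rintro ⟨-, hmem⟩
          exact ne_of_mem_wobble _ hmem he
        rw [if_neg (fun hc => hnw hc.2), if_pos ⟨hjn, by simpa using he⟩]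
        exact (classify_eq_one aw _).mpr he
      · by_cases hw : (aw && decide ((l1[j]!, l2[j]!) ∈ pvWobblePairs)) = true
        · rw [if_pos ⟨hjn, hw⟩]
          exact (classify_eq_two aw _).mpr hw
        · rw [if_neg (fun hc => hw hc.2), if_neg (fun hc => he (of_decide_eq_true hc.2))]
          unfold pvClassify
          rw [if_neg he, if_neg (by rw [cond_eq]; exact hw)]
  · -- pair_count
    dsimp only
    congr 1
    rw [List.count_eq_countP, List.countP_map, List.countP_eq_length_filter]
    congr 1
    apply List.filter_congr
    intro i hi
    rw [Bool.eq_iff_iff]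
    simp only [Function.comp_apply, beq_iff_eq, decide_eq_true_iff]
    exact classify_eq_one aw _
  · -- wobble_count
    dsimp only
    congr 1
    rw [List.count_eq_countP, List.countP_map, List.countP_eq_length_filter]
    congr 1
    apply List.filter_congr
    intro i hi
    rw [Bool.eq_iff_iff]
    simp only [Function.comp_apply, beq_iff_eq]
    exact classify_eq_two aw _
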